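-- pv_equiv track=rewrite | github.com/zeyuyuyu/abel-causal-advantage-benchmark | evaluate_batch1_v2.py | skill_dellma
-- ===== SOURCE A (Python) =====
-- skill_pref = ["AMD", "GME", "NVDA", "META", "GOOGL", "SPY", "DIS"]
--
-- def skill_dellma(options_raw, question):
--     opts = []
--     for o in options_raw:
--         opts.append("GOOGL" if o == "GOOG" else o)
--     if "SPY" in question and "SPY" not in opts:
--         opts.append("SPY")
--     for p in skill_pref:
--         if p in opts:
--             return p
--     return opts[0]
-- ===== SOURCE B (Python) =====
-- skill_pref = ["AMD", "GME", "NVDA", "META", "GOOGL", "SPY", "DIS"]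
--
-- def skill_dellma(options_raw, question):
--     opts = ["GOOGL" if o == "GOOG" else o for o in options_raw]
--     if "SPY" in question and "SPY" not in opts:
--         opts.append("SPY")
--     rank = {t: i for i, t in enumerate(skill_pref)}
--     return min(opts, key=lambda t: rank.get(t, len(skill_pref)))
-- ===== Notes on version B (the rewrite author's own statement) =====
-- stated objective: idiomatic
-- what changed: Replaces the scan over the preference list with repeated 'p in opts' membership tests by a rank dictionary built once from skill_pref and a single min() pass over opts (non-preferred tickers get sentinel rank len(skill_pref)); ties and the opts[0] fallback are preserved by min's first-minimum rule. Pre_ excludes empty options_raw with no 'SPY' in question, where A raises IndexError (B raises ValueError).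
import Mathlib
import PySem

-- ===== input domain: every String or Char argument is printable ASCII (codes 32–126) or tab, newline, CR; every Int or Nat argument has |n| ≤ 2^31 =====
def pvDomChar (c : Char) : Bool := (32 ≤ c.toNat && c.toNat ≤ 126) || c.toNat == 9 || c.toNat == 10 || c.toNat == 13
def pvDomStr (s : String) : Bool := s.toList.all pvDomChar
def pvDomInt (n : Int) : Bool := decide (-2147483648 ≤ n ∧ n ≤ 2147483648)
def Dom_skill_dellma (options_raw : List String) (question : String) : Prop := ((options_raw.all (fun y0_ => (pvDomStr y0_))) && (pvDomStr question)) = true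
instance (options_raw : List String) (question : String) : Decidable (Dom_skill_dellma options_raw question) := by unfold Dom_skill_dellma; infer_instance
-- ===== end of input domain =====

-- B replaces A's repeated preference-list membership scans over opts by one rank-lookup min pass over opts (idiomatic; same return value wherever A returns).

-- ===== PORT A =====
def skill_pref : List String := ["AMD", "GME", "NVDA", "META", "GOOGL", "SPY", "DIS"]

-- A's final loop: 'for p in skill_pref: if p in opts: return p' then 'return opts[0]'
-- (opts[0] on empty opts is an IndexError, excluded by Pre_; pyGet?.getD "" marks that spot)
def firstPref : List String → List String → String
  | [], opts => (PySem.List.pyGet? opts 0).getD ""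
  | p :: ps, opts => if opts.contains p then p else firstPref ps opts

def skill_dellma (options_raw : List String) (question : String) : String :=
  let opts := options_raw.foldl (fun acc o => acc ++ [if o == "GOOG" then "GOOGL" else o]) []
  let opts2 := if PySem.Str.isIn "SPY" question && !(opts.contains "SPY") then opts ++ ["SPY"] else opts
  firstPref skill_pref opts2

-- ===== PORT B =====
-- rank = {t: i for i, t in enumerate(skill_pref)}; rank.get(t, len(skill_pref))
def rankOf (t : String) : Int :=
  PySem.Dict.getD
    ((PySem.List.enumerate skill_pref 0).foldl (fun d p => d.insert p.2 p.1) PySem.Dict.empty)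
    t (PySem.List.len skill_pref)

def skill_dellma_alt (options_raw : List String) (question : String) : String :=
  let opts := options_raw.map (fun o => if o == "GOOG" then "GOOGL" else o)
  let opts2 := if PySem.Str.isIn "SPY" question && !(opts.contains "SPY") then opts ++ ["SPY"] else opts
  -- min(opts, key=…); min([]) raises ValueError, excluded by Pre_
  (PySem.List.min? opts2 rankOf).getD ""

-- ===== PRECONDITION & SPEC =====
-- Pre_ excludes exactly the inputs where A raises IndexError (and B ValueError):
-- empty options_raw with no "SPY" substring in question.
def Pre_skill_dellma (options_raw : List String) (question : String) : Prop :=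
  options_raw ≠ [] ∨ PySem.Str.isIn "SPY" question = true
instance (options_raw : List String) (question : String) : Decidable (Pre_skill_dellma options_raw question) := by unfold Pre_skill_dellma; infer_instance

def pvWitness_skill_dellma : List String × String := (["GOOG", "TSLA"], "should I buy SPY?")

def Spec_skill_dellma (options_raw : List String) (question : String) (out : String) : Prop := out = skill_dellma_alt options_raw question
instance (options_raw : List String) (question : String) (out : String) : Decidable (Spec_skill_dellma options_raw question out) := by unfold Spec_skill_dellma; infer_instance

-- ===== CLAIM (what is proved, stated in full; the proofs are below) =====
def Claim_equal_skill_dellma : Prop := ∀ (options_raw : List String) (question : String), Dom_skill_dellma options_raw question → Pre_skill_dellma options_raw question → Spec_skill_dellma options_raw question (skill_dellma options_raw question)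

-- ===== LEMMAS AND PROOFS =====

lemma rankOf_eq (t : String) : rankOf t =
    (if t = "AMD" then 0 else if t = "GME" then 1 else if t = "NVDA" then 2
     else if t = "META" then 3 else if t = "GOOGL" then 4 else if t = "SPY" then 5
     else if t = "DIS" then 6 else 7 : Int) := by
  by_cases h0 : t = "AMD"; · subst h0; decide
  by_cases h1 : t = "GME"; · subst h1; decide
  by_cases h2 : t = "NVDA"; · subst h2; decide
  by_cases h3 : t = "META"; · subst h3; decide
  by_cases h4 : t = "GOOGL"; · subst h4; decide
  by_cases h5 : t = "SPY"; · subst h5; decide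
  by_cases h6 : t = "DIS"; · subst h6; decide
  simp only [rankOf]
  rw [show ((PySem.List.enumerate skill_pref 0).foldl (fun d p => d.insert p.2 p.1) PySem.Dict.empty)
      = PySem.Dict.mk [("AMD", (0:Int)), ("GME", 1), ("NVDA", 2), ("META", 3), ("GOOGL", 4), ("SPY", 5), ("DIS", 6)] from rfl]
  simp only [PySem.Dict.getD, PySem.Dict.get?_mk_cons, beq_iff_eq]
  simp [eq_comm, h0, h1, h2, h3, h4, h5, h6, skill_pref, PySem.List.len, PySem.Dict.get?]

lemma foldl_min_keep {α : Type} (key : α → Int) (t : List α) (m : α)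
    (h : ∀ y ∈ t, ¬ key y < key m) :
    t.foldl (fun acc x => match acc with
      | none => some x
      | some m' => if key x < key m' then some x else some m') (some m) = some m := by
  induction t with
  | nil => rfl
  | cons y t ih =>
    simp only [List.foldl_cons]
    rw [if_neg (h y (by simp))]
    exact ih (fun z hz => h z (by simp [hz]))

lemma min?_eq_head_of_const {α : Type} (key : α → Int) (xs : List α) (c : Int)
    (h : ∀ y ∈ xs, key y = c) : PySem.List.min? xs key = xs.head? := by
  cases xs with
  | nil => rfl
  | cons x t =>
    simp only [PySem.List.min?, List.foldl_cons, List.head?_cons]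
    exact foldl_min_keep key t x (fun y hy => by
      rw [h y (by simp [hy]), h x (by simp)]; omega)

lemma min?_eq_of_unique {α : Type} (key : α → Int) (xs : List α) (m' : α)
    (hm : m' ∈ xs) (hle : ∀ y ∈ xs, key m' ≤ key y)
    (huniq : ∀ y ∈ xs, key y = key m' → y = m') :
    PySem.List.min? xs key = some m' := by
  obtain ⟨m, hmin⟩ : ∃ m, PySem.List.min? xs key = some m := by
    cases hx : PySem.List.min? xs key with
    | none =>
      rw [(PySem.List.min?_eq_none_iff xs key).mp hx] at hm
      exact absurd hm (List.not_mem_nil)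
    | some m => exact ⟨m, rfl⟩
  have hmem := PySem.List.min?_mem hmin
  have h1 := PySem.List.min?_isMin hmin m' hm
  have h2 := hle m hmem
  rw [hmin, huniq m hmem (le_antisymm h1 h2)]

lemma rankOf_0 : rankOf "AMD" = 0 := by decide
lemma rankOf_1 : rankOf "GME" = 1 := by decide
lemma rankOf_2 : rankOf "NVDA" = 2 := by decide
lemma rankOf_3 : rankOf "META" = 3 := by decide
lemma rankOf_4 : rankOf "GOOGL" = 4 := by decide
lemma rankOf_5 : rankOf "SPY" = 5 := by decide
lemma rankOf_6 : rankOf "DIS" = 6 := by decide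

set_option maxHeartbeats 2000000 in
lemma chain_eq (opts : List String) (hne : opts ≠ []) :
    firstPref skill_pref opts = (PySem.List.min? opts rankOf).getD "" := by
  by_cases h0 : "AMD" ∈ opts
  · rw [min?_eq_of_unique rankOf opts "AMD" h0
      (fun y _ => by rw [rankOf_0, rankOf_eq]; split_ifs <;> omega)
      (fun y _ hk => by
        rw [rankOf_0, rankOf_eq] at hk; split_ifs at hk <;> first | assumption | omega)]
    simp [skill_pref, firstPref, h0]
  by_cases h1 : "GME" ∈ opts
  · rw [min?_eq_of_unique rankOf opts "GME" h1
      (fun y hy => by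
        rw [rankOf_1, rankOf_eq]; split_ifs with a <;>
          first | (subst a; exact absurd hy h0) | omega)
      (fun y _ hk => by
        rw [rankOf_1, rankOf_eq] at hk; split_ifs at hk <;> first | assumption | omega)]
    simp [skill_pref, firstPref, h0, h1]
  by_cases h2 : "NVDA" ∈ opts
  · rw [min?_eq_of_unique rankOf opts "NVDA" h2
      (fun y hy => by
        rw [rankOf_2, rankOf_eq]; split_ifs with a b <;>
          first | (subst a; exact absurd hy h0) | (subst b; exact absurd hy h1) | omega)
      (fun y _ hk => by
        rw [rankOf_2, rankOf_eq] at hk; split_ifs at hk <;> first | assumption | omega)]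
    simp [skill_pref, firstPref, h0, h1, h2]
  by_cases h3 : "META" ∈ opts
  · rw [min?_eq_of_unique rankOf opts "META" h3
      (fun y hy => by
        rw [rankOf_3, rankOf_eq]; split_ifs with a b c <;>
          first | (subst a; exact absurd hy h0) | (subst b; exact absurd hy h1) | (subst c; exact absurd hy h2) | omega)
      (fun y _ hk => by
        rw [rankOf_3, rankOf_eq] at hk; split_ifs at hk <;> first | assumption | omega)]
    simp [skill_pref, firstPref, h0, h1, h2, h3]
  by_cases h4 : "GOOGL" ∈ opts
  · rw [min?_eq_of_unique rankOf opts "GOOGL" h4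
      (fun y hy => by
        rw [rankOf_4, rankOf_eq]; split_ifs with a b c d <;>
          first | (subst a; exact absurd hy h0) | (subst b; exact absurd hy h1) | (subst c; exact absurd hy h2) | (subst d; exact absurd hy h3) | omega)
      (fun y _ hk => by
        rw [rankOf_4, rankOf_eq] at hk; split_ifs at hk <;> first | assumption | omega)]
    simp [skill_pref, firstPref, h0, h1, h2, h3, h4]
  by_cases h5 : "SPY" ∈ opts
  · rw [min?_eq_of_unique rankOf opts "SPY" h5
      (fun y hy => by
        rw [rankOf_5, rankOf_eq]; split_ifs with a b c d e <;>
          first | (subst a; exact absurd hy h0) | (subst b; exact absurd hy h1) | (subst c; exact absurd hy h2) | (subst d; exact absurd hy h3) | (subst e; exact absurd hy h4) | omega)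
      (fun y _ hk => by
        rw [rankOf_5, rankOf_eq] at hk; split_ifs at hk <;> first | assumption | omega)]
    simp [skill_pref, firstPref, h0, h1, h2, h3, h4, h5]
  by_cases h6 : "DIS" ∈ opts
  · rw [min?_eq_of_unique rankOf opts "DIS" h6
      (fun y hy => by
        rw [rankOf_6, rankOf_eq]; split_ifs with a b c d e f <;>
          first | (subst a; exact absurd hy h0) | (subst b; exact absurd hy h1) | (subst c; exact absurd hy h2) | (subst d; exact absurd hy h3) | (subst e; exact absurd hy h4) | (subst f; exact absurd hy h5) | omega)
      (fun y _ hk => by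
        rw [rankOf_6, rankOf_eq] at hk; split_ifs at hk <;> first | assumption | omega)]
    simp [skill_pref, firstPref, h0, h1, h2, h3, h4, h5, h6]
  rw [min?_eq_head_of_const rankOf opts 7
    (fun y hy => by
      rw [rankOf_eq]; split_ifs with a b c d e f g <;>
        first | (subst a; exact absurd hy h0) | (subst b; exact absurd hy h1) | (subst c; exact absurd hy h2) | (subst d; exact absurd hy h3) | (subst e; exact absurd hy h4) | (subst f; exact absurd hy h5) | (subst g; exact absurd hy h6) | rfl)]
  cases opts with
  | nil => exact absurd rfl hne
  | cons x t =>
    simp [skill_pref, firstPref, h0, h1, h2, h3, h4, h5, h6, PySem.List.pyGet?, PySem.List.pyIdx?]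

-- ===== VERDICT (by name: the statement is the Claim_ definition above) =====
theorem skill_dellma_spec : Claim_equal_skill_dellma := by
  intro options_raw question _ hpre
  unfold Spec_skill_dellma skill_dellma skill_dellma_alt
  rw [PySem.List.foldl_append_singleton_eq_map, List.nil_append]
  set opts := options_raw.map (fun o => if o == "GOOG" then "GOOGL" else o) with hopts
  cases hc : PySem.Str.isIn "SPY" question && !(opts.contains "SPY") with
  | true =>
    simp only [hc, if_true]
    exact chain_eq _ (by simp)
  | false =>
    simp only [hc, Bool.false_eq_true, if_false]
    apply chain_eq
    rcases hpre with h | h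
    · rw [hopts]
      simpa using h
    · rw [h, Bool.true_and] at hc
      have hsp : opts.contains "SPY" = true := by
        cases hcc : opts.contains "SPY"
        · rw [hcc] at hc; simp at hc
        · rfl
      intro hnil
      rw [hnil] at hsp
      simp at hsp
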